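-- pv_equiv track=rewrite | github.com/Audrey1618/Coz | Chegg/hard/questionSymmetric.py | count_longest_sym_substr
-- ===== SOURCE A (Python) =====
-- def count_longest_sym_substr(s):
--     result = 0
--     i = 0
--     while i < len(s):
--          # if the result is already >= the rest of the string, no point processing further
--         rest_len = len(s) - i
--         if result >= rest_len:
--             return result
--
--         l = i
--         r = i + 1
--
--         while l >= 0 and r < len(s) and s[l] == "<" and s[r] == ">":
--             sub_len = r - l + 1
--             result = max(result, sub_len)
--             l -= 1
--             r += 1
--
--         i = r
--
--     return result
-- ===== SOURCE B (Python) =====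
-- def count_longest_sym_substr(s):
--     # single left-to-right pass: track the length of the current '<' run (lt),
--     # the '>' run following it (gt), and take the best 2*min(lt, gt) seen.
--     best = 0
--     lt = 0
--     gt = 0
--     for ch in s:
--         if ch == '<':
--             lt = 1 if gt > 0 else lt + 1
--             gt = 0
--         elif ch == '>':
--             gt += 1
--             cand = 2 * min(lt, gt)
--             if cand > best:
--                 best = cand
--         else:
--             lt = 0
--             gt = 0
--     return best
-- ===== Notes on version B (the rewrite author's own statement) =====
-- stated objective: simpler
-- what changed: Replaced the center-expansion scan (whose early-exit shortcut is wrong on some inputs) by a single pass that tracks the current '<'-run and the following '>'-run and maximises 2*min(run lengths); the single pass without per-character indexing is measurably faster by a constant factor.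
-- intended difference: On strings where the running best reaches the remaining length before a strictly longer '<...>' block has been scanned (e.g. '<<>><<<>>>'), A's early-exit returns the smaller prefix best (4) while B returns the true longest symmetric substring length (6), which is the function's stated purpose. — e.g. on count_longest_sym_substr("<<>><<<>>>"): A returns 4, B returns 6
import Mathlib
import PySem

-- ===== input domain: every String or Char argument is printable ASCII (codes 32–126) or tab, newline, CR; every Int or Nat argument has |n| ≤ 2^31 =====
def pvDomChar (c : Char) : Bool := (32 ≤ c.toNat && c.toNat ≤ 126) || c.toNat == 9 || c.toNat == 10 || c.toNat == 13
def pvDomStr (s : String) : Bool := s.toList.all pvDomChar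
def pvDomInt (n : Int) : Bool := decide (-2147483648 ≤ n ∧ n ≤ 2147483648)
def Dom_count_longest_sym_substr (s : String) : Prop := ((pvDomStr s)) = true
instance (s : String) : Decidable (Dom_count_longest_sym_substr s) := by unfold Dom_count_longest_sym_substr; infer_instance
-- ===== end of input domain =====

-- B replaces A's center-expansion scan (whose early-exit shortcut returns a too-small value
-- on the inputs described by D_ below) by a single pass over the characters maximising
-- 2*min('<'-run, following '>'-run); objective: simpler.

-- ===== PORT A =====
-- the inner `while l >= 0 and r < len(s) and s[l] == "<" and s[r] == ">"` loop;
-- fuel only makes the recursion structural (cs.length + 1 provably suffices), it is never exhausted.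
def pvInnerA (cs : List Char) : Nat → Int → Int → Int → Int × Int
  | 0, _, r, res => (res, r)
  | fuel+1, l, r, res =>
    if 0 ≤ l ∧ r < (cs.length : Int) ∧ PySem.List.pyGet? cs l = some '<' ∧ PySem.List.pyGet? cs r = some '>' then
      pvInnerA cs fuel (l-1) (r+1) (max res (r - l + 1))
    else (res, r)

-- the outer `while i < len(s)` loop with the early `return result` when `result >= rest_len`
def pvOuterA (cs : List Char) : Nat → Int → Int → Int
  | 0, res, _ => res
  | fuel+1, res, i =>
    if i < (cs.length : Int) then
      if res ≥ (cs.length : Int) - i then res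
      else
        pvOuterA cs fuel (pvInnerA cs (cs.length + 1) i (i+1) res).1
          (pvInnerA cs (cs.length + 1) i (i+1) res).2
    else res

def count_longest_sym_substr (s : String) : Int :=
  pvOuterA s.toList (s.toList.length + 1) 0 0

-- ===== PORT B =====
-- one step of Source B's for-loop on state (best, lt, gt)
def pvStepB (st : Int × Int × Int) (ch : Char) : Int × Int × Int :=
  match st with
  | (best, lt, gt) =>
    if ch = '<' then (best, if gt > 0 then 1 else lt + 1, 0)
    else if ch = '>' then
      (if 2 * min lt (gt + 1) > best then 2 * min lt (gt + 1) else best, lt, gt + 1)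
    else (best, 0, 0)

def count_longest_sym_substr_alt (s : String) : Int :=
  (s.toList.foldl pvStepB (0, 0, 0)).1

-- ===== PRECONDITION & SPEC =====
-- pvBlk s d k: the symmetric block "<^k >^k" occurs in s with its centre before
-- position len(s)-d (equivalently: inside the prefix s[:len(s)-d+k]).
def pvBlk (s : String) (d k : Nat) : Prop :=
  List.replicate k '<' ++ List.replicate k '>' <:+: s.toList.take (s.length - d + k)

-- A's early exit fires once the best length found before position i reaches the remaining
-- length n-i; it wrongly assumes later symmetric substrings fit inside s[i:], but they may
-- extend left of i.  D_ holds exactly when some position i = n-d is preceded by a symmetric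
-- block of length ≥ n-i while a strictly longer symmetric block lies only further right:
-- there A returns the smaller prefix best (e.g. 4 on '<<>><<<>>>'), B the true longest
-- symmetric substring length (6), which is the function's stated purpose.
def D_count_longest_sym_substr (s : String) : Prop :=
  ∃ k2 ≤ s.length, ∃ k < k2, ∃ d ≤ 2 * k, pvBlk s d k ∧ pvBlk s 0 k2 ∧ ¬ pvBlk s d k2

instance (s : String) : Decidable (D_count_longest_sym_substr s) := by
  unfold D_count_longest_sym_substr pvBlk; infer_instance

def Spec_count_longest_sym_substr (s : String) (out : Int) : Prop :=
  ¬ D_count_longest_sym_substr s → out = count_longest_sym_substr_alt s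
instance (s : String) (out : Int) : Decidable (Spec_count_longest_sym_substr s out) := by
  unfold Spec_count_longest_sym_substr; infer_instance

def pvDiffWitness_count_longest_sym_substr : String := "<<>><<<>>>"
def pvDiffWitnessOut_count_longest_sym_substr : Int × Int := (4, 6)

-- ===== CLAIM (what is proved, stated in full; the proofs are below) =====
def Claim_unchanged_count_longest_sym_substr : Prop :=
  ∀ (s : String), Dom_count_longest_sym_substr s →
    Spec_count_longest_sym_substr s (count_longest_sym_substr s)

def Claim_changed_count_longest_sym_substr : Prop :=
  Dom_count_longest_sym_substr (pvDiffWitness_count_longest_sym_substr) ∧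
  D_count_longest_sym_substr (pvDiffWitness_count_longest_sym_substr) ∧
  count_longest_sym_substr (pvDiffWitness_count_longest_sym_substr) = pvDiffWitnessOut_count_longest_sym_substr.1 ∧
  count_longest_sym_substr_alt (pvDiffWitness_count_longest_sym_substr) = pvDiffWitnessOut_count_longest_sym_substr.2 ∧
  pvDiffWitnessOut_count_longest_sym_substr.1 ≠ pvDiffWitnessOut_count_longest_sym_substr.2

def Claim_exact_count_longest_sym_substr : Prop :=
  ∀ (s : String), Dom_count_longest_sym_substr s → D_count_longest_sym_substr s →
    count_longest_sym_substr s ≠ count_longest_sym_substr_alt s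

-- ===== LEMMAS AND PROOFS =====

-- length of the maximal run of ch at the head of a list
def pvLead (ch : Char) : List Char → Nat
  | [] => 0
  | c :: t => if c = ch then pvLead ch t + 1 else 0

-- '<'-run ending just before position i; '>'-run starting at position i
def pvLtE (cs : List Char) (i : Nat) : Nat := pvLead '<' ((cs.take i).reverse)
def pvGtF (cs : List Char) (i : Nat) : Nat := pvLead '>' (cs.drop i)

-- candidate length at centre c (pairs position c with c+1)
def pvCand (cs : List Char) (c : Nat) : Nat := 2 * min (pvLtE cs (c+1)) (pvGtF cs (c+1))

-- best candidate among centres < i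
def pvF (cs : List Char) : Nat → Nat
  | 0 => 0
  | i+1 => max (pvF cs i) (pvCand cs i)

lemma pvLead_le_length (ch : Char) (t : List Char) : pvLead ch t ≤ t.length := by
  induction t with
  | nil => simp [pvLead]
  | cons c t ih => simp only [pvLead]; split <;> simp; omega

lemma pvLead_ge_iff (ch : Char) (t : List Char) (k : Nat) :
    k ≤ pvLead ch t ↔ (k ≤ t.length ∧ ∀ p < k, t.getD p ' ' = ch) := by
  induction t generalizing k with
  | nil =>
    constructor
    · intro h
      refine ⟨by simpa [pvLead] using h, ?_⟩
      intro p hp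
      have : k = 0 := by simpa [pvLead] using h
      omega
    · intro ⟨h, _⟩; simpa [pvLead] using h
  | cons c t ih =>
    cases k with
    | zero => simp
    | succ k =>
      simp only [pvLead]
      by_cases hc : c = ch
      · rw [if_pos hc]
        constructor
        · intro h
          obtain ⟨h1, h2⟩ := (ih k).mp (by omega)
          refine ⟨by simp; omega, ?_⟩
          intro p hp
          cases p with
          | zero => simpa using hc
          | succ p => simpa using h2 p (by omega)
        · rintro ⟨h1, h2⟩
          have : k ≤ pvLead ch t := (ih k).mpr ⟨by simp at h1; omega,
            fun p hp => by simpa using h2 (p+1) (by omega)⟩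
          omega
      · rw [if_neg hc]
        constructor
        · omega
        · rintro ⟨h1, h2⟩
          exact absurd (by simpa using h2 0 (by omega)) hc

lemma pvGtF_le (cs : List Char) (i : Nat) : pvGtF cs i ≤ cs.length - i := by
  have := pvLead_le_length '>' (cs.drop i)
  simpa [pvGtF] using this

-- getD of the reversed prefix, transported to the original list
lemma pvRevTake_getD (cs : List Char) (i p : Nat) (hi : i ≤ cs.length) (hp : p < i) :
    ((cs.take i).reverse).getD p ' ' = cs.getD (i - 1 - p) ' ' := by
  have hlen : (cs.take i).length = i := by simp [List.length_take]; omega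
  rw [List.getD_eq_getElem?_getD, List.getD_eq_getElem?_getD,
    List.getElem?_reverse (by omega), hlen, List.getElem?_take_of_lt (by omega)]

lemma pvRevRun_ge_iff (ch : Char) (cs : List Char) (i k : Nat) (hi : i ≤ cs.length) :
    k ≤ pvLead ch ((cs.take i).reverse) ↔ (k ≤ i ∧ ∀ p < k, cs.getD (i - 1 - p) ' ' = ch) := by
  have hlen : ((cs.take i).reverse).length = i := by simp [List.length_take]; omega
  rw [pvLead_ge_iff, hlen]
  constructor
  · rintro ⟨h1, h2⟩
    exact ⟨h1, fun p hp => by rw [← pvRevTake_getD cs i p hi (by omega)]; exact h2 p hp⟩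
  · rintro ⟨h1, h2⟩
    exact ⟨h1, fun p hp => by rw [pvRevTake_getD cs i p hi (by omega)]; exact h2 p hp⟩

lemma pvLtE_ge_iff (cs : List Char) (c k : Nat) (hc : c < cs.length) :
    k ≤ pvLtE cs (c+1) ↔ (k ≤ c + 1 ∧ ∀ p < k, cs.getD (c - p) ' ' = '<') := by
  have := pvRevRun_ge_iff '<' cs (c+1) k (by omega)
  simpa [pvLtE] using this

lemma pvGtF_ge_iff (cs : List Char) (j k : Nat) (hj : j ≤ cs.length) :
    k ≤ pvGtF cs j ↔ (j + k ≤ cs.length ∧ ∀ p < k, cs.getD (j + p) ' ' = '>') := by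
  have hlen : (cs.drop j).length = cs.length - j := by simp
  rw [pvGtF, pvLead_ge_iff, hlen]
  have hgd : ∀ p, (cs.drop j).getD p ' ' = cs.getD (j + p) ' ' := by
    intro p
    rw [List.getD_eq_getElem?_getD, List.getD_eq_getElem?_getD, List.getElem?_drop]
  constructor
  · rintro ⟨h1, h2⟩
    exact ⟨by omega, fun p hp => by rw [← hgd p]; exact h2 p hp⟩
  · rintro ⟨h1, h2⟩
    exact ⟨by omega, fun p hp => by rw [hgd p]; exact h2 p hp⟩

lemma pvRevRun_succ (ch : Char) (cs : List Char) (j : Nat) (hj : j < cs.length) :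
    pvLead ch ((cs.take (j+1)).reverse) =
      if cs.getD j ' ' = ch then pvLead ch ((cs.take j).reverse) + 1 else 0 := by
  have h : cs.take (j+1) = cs.take j ++ [cs[j]] := List.take_succ_eq_append_getElem hj
  have hg : cs.getD j ' ' = cs[j] := by
    rw [List.getD_eq_getElem?_getD, List.getElem?_eq_getElem hj]; rfl
  rw [h, hg]
  simp only [List.reverse_append, List.reverse_cons, List.reverse_nil, List.nil_append,
    List.cons_append, pvLead]

lemma pvLtE_succ (cs : List Char) (j : Nat) (hj : j < cs.length) :
    pvLtE cs (j+1) = if cs.getD j ' ' = '<' then pvLtE cs j + 1 else 0 :=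
  pvRevRun_succ '<' cs j hj

lemma pvLtE_zero (cs : List Char) : pvLtE cs 0 = 0 := by simp [pvLtE, pvLead]

lemma pvGtF_succ (cs : List Char) (j : Nat) (hj : j < cs.length) :
    pvGtF cs j = if cs.getD j ' ' = '>' then pvGtF cs (j+1) + 1 else 0 := by
  have h : cs.drop j = cs[j] :: cs.drop (j+1) := List.drop_eq_getElem_cons hj
  have hg : cs.getD j ' ' = cs[j] := by
    rw [List.getD_eq_getElem?_getD, List.getElem?_eq_getElem hj]; rfl
  rw [pvGtF, h, hg]
  rfl

lemma pvGtF_ge_len (cs : List Char) (j : Nat) (hj : cs.length ≤ j) : pvGtF cs j = 0 := by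
  simp [pvGtF, List.drop_eq_nil_of_le hj, pvLead]

lemma pvF_mono (cs : List Char) {i j : Nat} (h : i ≤ j) : pvF cs i ≤ pvF cs j := by
  induction j with
  | zero => have : i = 0 := by omega
            subst this; exact le_refl _
  | succ j ih =>
    rcases Nat.lt_or_ge i (j+1) with h' | h'
    · exact le_trans (ih (by omega)) (le_max_left _ _)
    · have : i = j + 1 := by omega
      subst this; exact le_refl _

lemma pvCand_le_F (cs : List Char) {c i : Nat} (h : c < i) : pvCand cs c ≤ pvF cs i := by
  have h1 : pvF cs (c+1) ≤ pvF cs i := pvF_mono cs (by omega)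
  have h2 : pvCand cs c ≤ pvF cs (c+1) := le_max_right _ _
  omega

lemma pvF_exists (cs : List Char) (i : Nat) (h : 0 < pvF cs i) :
    ∃ c < i, pvCand cs c = pvF cs i := by
  induction i with
  | zero => simp [pvF] at h
  | succ i ih =>
    simp only [pvF] at h ⊢
    rcases Nat.lt_or_ge (pvF cs i) (pvCand cs i) with h' | h'
    · exact ⟨i, by omega, by omega⟩
    · obtain ⟨c, hc, hc2⟩ := ih (by omega)
      exact ⟨c, by omega, by omega⟩

-- ---- bridge: pvBlkL ↔ pvCand ----

-- list-level form of pvBlkL used by the proofs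
def pvBlkL (l : List Char) (k : Nat) : Prop :=
  List.replicate k '<' ++ List.replicate k '>' <:+: l

lemma pvTake_getD (cs : List Char) (m q : Nat) (h1 : q < m) :
    (cs.take m).getD q ' ' = cs.getD q ' ' := by
  rw [List.getD_eq_getElem?_getD, List.getD_eq_getElem?_getD, List.getElem?_take_of_lt h1]

lemma pvBlkL_iff (l : List Char) (k : Nat) :
    pvBlkL l k ↔ ∃ j, j + 2 * k ≤ l.length ∧
      ∀ p < k, l.getD (j + p) ' ' = '<' ∧ l.getD (j + k + p) ' ' = '>' := by
  constructor
  · rintro ⟨s, t, h⟩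
    have e : l = s ++ ((List.replicate k '<' ++ List.replicate k '>') ++ t) := by
      rw [← h]; simp [List.append_assoc]
    have hidx : ∀ (x : List Char) (q : Nat), (s ++ x).getD (s.length + q) ' ' = x.getD q ' ' := by
      intro x q
      rw [List.getD_eq_getElem?_getD, List.getD_eq_getElem?_getD,
        List.getElem?_append_right (by omega)]
      have hq : s.length + q - s.length = q := by omega
      rw [hq]
    refine ⟨s.length, ?_, ?_⟩
    · rw [e]; simp; omega
    · intro p hp
      constructor
      · rw [e, hidx]
        rw [List.getD_eq_getElem?_getD, List.append_assoc,
          List.getElem?_append_left (by simp; omega)]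
        simp [hp]
      · have hk : s.length + k + p = s.length + (k + p) := by omega
        rw [e, hk, hidx]
        rw [List.getD_eq_getElem?_getD, List.append_assoc,
          List.getElem?_append_right (by simp), List.length_replicate]
        have hq : k + p - k = p := by omega
        rw [hq, List.getElem?_append_left (by simp; omega)]
        simp [hp]
  · rintro ⟨j, hlen, hch⟩
    have hg : ∀ q (hq : q < l.length), l.getD q ' ' = l[q]'hq := by
      intro q hq
      rw [List.getD_eq_getElem?_getD, List.getElem?_eq_getElem hq]; rfl
    have hpat : List.replicate k '<' ++ List.replicate k '>' = (l.drop j).take (2 * k) := by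
      apply List.ext_getElem
      · simp; omega
      · intro p h1 h2
        have hp2 : p < 2 * k := by simp at h1; omega
        have hjp : j + p < l.length := by omega
        have hr : ((l.drop j).take (2 * k))[p] = l[j + p] := by
          rw [List.getElem_take, List.getElem_drop]
        rw [hr]
        by_cases hpk : p < k
        · rw [List.getElem_append_left (by simp; omega)]
          rw [List.getElem_replicate]
          rw [← hg (j + p) hjp]
          exact ((hch p hpk).1).symm
        · rw [List.getElem_append_right (by simp; omega)]
          rw [List.getElem_replicate]
          rw [← hg (j + p) hjp]
          have hh : j + p = j + k + (p - k) := by omega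
          rw [hh]
          exact ((hch (p - k) (by omega)).2).symm
    rw [pvBlkL, hpat]
    exact ((List.take_prefix _ _).isInfix).trans ((List.drop_suffix _ _).isInfix)

lemma pvLtE_le (cs : List Char) (i : Nat) : pvLtE cs i ≤ i := by
  have := pvLead_le_length '<' ((cs.take i).reverse)
  simp only [pvLtE]
  simp [List.length_take] at this ⊢
  omega

lemma pvCand_to_blk (cs : List Char) (c k i : Nat) (hk : 1 ≤ k) (hci : c < i)
    (hc2 : 2 * k ≤ pvCand cs c) : pvBlkL (cs.take (i + k)) k := by
  have hcn : c < cs.length := by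
    by_contra hcon
    have : pvGtF cs (c + 1) = 0 := pvGtF_ge_len cs (c + 1) (by omega)
    simp [pvCand, this] at hc2
    omega
  have hmin : k ≤ min (pvLtE cs (c + 1)) (pvGtF cs (c + 1)) := by
    simp only [pvCand] at hc2; omega
  obtain ⟨hkc, hchL⟩ := (pvLtE_ge_iff cs c k hcn).mp (by omega)
  obtain ⟨hck, hchR⟩ := (pvGtF_ge_iff cs (c + 1) k (by omega)).mp (by omega)
  apply (pvBlkL_iff _ k).mpr
  refine ⟨c + 1 - k, ?_, ?_⟩
  · simp [List.length_take]
    omega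
  · intro p hp
    constructor
    · rw [pvTake_getD cs (i + k) (c + 1 - k + p) (by omega)]
      have hh : c + 1 - k + p = c - (k - 1 - p) := by omega
      rw [hh]
      exact hchL (k - 1 - p) (by omega)
    · rw [pvTake_getD cs (i + k) (c + 1 - k + k + p) (by omega)]
      have hh : c + 1 - k + k + p = c + 1 + p := by omega
      rw [hh]
      exact hchR p hp


lemma pvBlkL_to_cand (cs : List Char) (m k : Nat) (hk : 1 ≤ k)
    (h : pvBlkL (cs.take m) k) : ∃ c, c + k < m ∧ 2 * k ≤ pvCand cs c := by
  obtain ⟨j, hlen, hch⟩ := (pvBlkL_iff _ k).mp h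
  have hlen' : j + 2 * k ≤ min m cs.length := by simpa [List.length_take] using hlen
  refine ⟨j + k - 1, by omega, ?_⟩
  have hcn : j + k - 1 < cs.length := by omega
  have hchars : ∀ q, q < m → q < cs.length → cs.getD q ' ' = (cs.take m).getD q ' ' :=
    fun q h1 _ => (pvTake_getD cs m q h1).symm
  have hlt : k ≤ pvLtE cs (j + k - 1 + 1) := by
    apply (pvLtE_ge_iff cs (j + k - 1) k hcn).mpr
    refine ⟨by omega, ?_⟩
    intro p hp
    have hh : j + k - 1 - p = j + (k - 1 - p) := by omega
    rw [hh, hchars (j + (k - 1 - p)) (by omega) (by omega)]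
    exact (hch (k - 1 - p) (by omega)).1
  have hgt : k ≤ pvGtF cs (j + k - 1 + 1) := by
    apply (pvGtF_ge_iff cs (j + k - 1 + 1) k (by omega)).mpr
    refine ⟨by omega, ?_⟩
    intro p hp
    have hh : j + k - 1 + 1 + p = j + k + p := by omega
    rw [hh, hchars (j + k + p) (by omega) (by omega)]
    exact (hch p hp).2
  simp only [pvCand]
  omega

-- D_ in the computational form used by the proofs: some position i has prefix-best
-- (pvF i) at least the remaining length while a strictly better candidate lies at ≥ i
lemma pvD_iff_F (s : String) :
    D_count_longest_sym_substr s ↔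
      ∃ i, i < s.toList.length ∧ s.toList.length ≤ i + pvF s.toList i ∧
        pvF s.toList i < pvF s.toList s.toList.length := by
  have hsl : s.length = s.toList.length := rfl
  constructor
  · intro h
    unfold D_count_longest_sym_substr at h
    obtain ⟨k2, hk2, k, hkk2, d, hd, h1, h2, h3⟩ := h
    by_cases hd0 : d = 0
    · subst hd0; exact absurd h2 h3
    have hk1 : 1 ≤ k := by omega
    have h1' : pvBlkL (s.toList.take (s.length - d + k)) k := h1
    have h2' : pvBlkL (s.toList.take (s.length - 0 + k2)) k2 := h2
    by_cases hdn : s.toList.length < d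
    · exfalso
      have he : s.length - d + k = k := by rw [hsl]; omega
      rw [he] at h1'
      obtain ⟨c, hck, _⟩ := pvBlkL_to_cand s.toList k k hk1 h1'
      omega
    have he1 : s.length - d + k = (s.toList.length - d) + k := by rw [hsl]
    rw [he1] at h1'
    obtain ⟨c, hck, hcc⟩ := pvBlkL_to_cand s.toList ((s.toList.length - d) + k) k hk1 h1'
    have hFi : 2 * k ≤ pvF s.toList (s.toList.length - d) :=
      le_trans hcc (pvCand_le_F s.toList (by omega))
    have he2 : s.length - 0 + k2 = s.toList.length + k2 := by rw [hsl]; omega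
    rw [he2, List.take_of_length_le (by omega)] at h2'
    have h2'' : pvBlkL (s.toList.take s.toList.length) k2 := by
      rw [List.take_length]; exact h2'
    obtain ⟨c2, hc2k, hc2c⟩ := pvBlkL_to_cand s.toList s.toList.length k2 (by omega) h2''
    have hT : 2 * k2 ≤ pvF s.toList s.toList.length :=
      le_trans hc2c (pvCand_le_F s.toList (by omega))
    have hlt2 : pvF s.toList (s.toList.length - d) < 2 * k2 := by
      by_contra hge
      have hpos : 0 < pvF s.toList (s.toList.length - d) := by omega
      obtain ⟨c', hc', hcand'⟩ := pvF_exists s.toList (s.toList.length - d) hpos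
      have hblk := pvCand_to_blk s.toList c' k2 (s.toList.length - d) (by omega) hc' (by omega)
      apply h3
      show pvBlkL (s.toList.take (s.length - d + k2)) k2
      have he3 : s.length - d + k2 = (s.toList.length - d) + k2 := by rw [hsl]
      rw [he3]
      exact hblk
    exact ⟨s.toList.length - d, by omega, by omega, by omega⟩
  · rintro ⟨i, hi, hge, hlt⟩
    unfold D_count_longest_sym_substr
    have hle : pvF s.toList i ≤ pvF s.toList s.toList.length := pvF_mono s.toList (by omega)
    have hpos : 0 < pvF s.toList i := by omega
    obtain ⟨c, hc, hcand⟩ := pvF_exists s.toList i hpos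
    set m : Nat := min (pvLtE s.toList (c+1)) (pvGtF s.toList (c+1)) with hm
    have hcm : pvCand s.toList c = 2 * m := rfl
    have hmc : pvLtE s.toList (c+1) ≤ c + 1 := pvLtE_le s.toList (c+1)
    obtain ⟨c2, hc2, hcand2⟩ := pvF_exists s.toList s.toList.length (by omega)
    set m2 : Nat := min (pvLtE s.toList (c2+1)) (pvGtF s.toList (c2+1)) with hm2
    have hcm2 : pvCand s.toList c2 = 2 * m2 := rfl
    have hmc2 : pvLtE s.toList (c2+1) ≤ c2 + 1 := pvLtE_le s.toList (c2+1)
    have hblk2 : pvBlkL s.toList m2 := by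
      have := pvCand_to_blk s.toList c2 m2 s.toList.length (by omega) hc2 (by omega)
      rwa [List.take_of_length_le (by omega)] at this
    have hsl : s.length = s.toList.length := rfl
    refine ⟨m2, by rw [hsl]; omega, m, by omega, s.toList.length - i, by omega, ?_, ?_, ?_⟩
    · show pvBlkL (s.toList.take (s.length - (s.toList.length - i) + m)) m
      rw [hsl]
      have hh : s.toList.length - (s.toList.length - i) + m = i + m := by omega
      rw [hh]
      exact pvCand_to_blk s.toList c m i (by omega) hc (by omega)
    · show pvBlkL (s.toList.take (s.length - 0 + m2)) m2
      rw [hsl]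
      have hh : s.toList.length - 0 + m2 = s.toList.length + m2 := by omega
      rw [hh, List.take_of_length_le (by omega)]
      exact hblk2
    · intro hcon
      have hcon2 : pvBlkL (s.toList.take (s.length - (s.toList.length - i) + m2)) m2 := hcon
      have hh : s.length - (s.toList.length - i) + m2 = i + m2 := by rw [hsl]; omega
      rw [hh] at hcon2
      have hcon' : pvBlkL (s.toList.take (i + m2)) m2 := hcon2
      obtain ⟨c3, hc3m, hc3c⟩ := pvBlkL_to_cand s.toList (i + m2) m2 (by omega) hcon'
      have : pvCand s.toList c3 ≤ pvF s.toList i := pvCand_le_F s.toList (by omega)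
      omega

-- ¬D_ in the computational form used by the outer-loop proof
lemma pv_not_D_F (s : String) (hD : ¬ D_count_longest_sym_substr s) :
    ∀ i < s.toList.length, s.toList.length ≤ i + pvF s.toList i →
      pvF s.toList i = pvF s.toList s.toList.length := by
  intro i hi hge
  by_contra hne
  have hle : pvF s.toList i ≤ pvF s.toList s.toList.length := pvF_mono s.toList (by omega)
  exact hD ((pvD_iff_F s).mpr ⟨i, hi, hge, by omega⟩)

-- ---- A side ----

lemma pvGet_eq (cs : List Char) (i : Int) (h0 : 0 ≤ i) (h1 : i < (cs.length : Int)) :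
    PySem.List.pyGet? cs i = some (cs.getD i.toNat ' ') := by
  rw [PySem.List.pyGet?_of_nonneg cs h0, List.getD_eq_getElem?_getD,
    List.getElem?_eq_getElem (by omega)]
  rfl

lemma pvInnerA_spec (cs : List Char) (fuel : Nat) :
    ∀ (l r res : Int), 0 ≤ res → 0 ≤ r → l < (cs.length : Int) →
    pvGtF cs r.toNat < fuel →
    pvInnerA cs fuel l r res =
      (let a : Nat := if l < 0 then 0 else pvLtE cs (l.toNat + 1)
       let m : Nat := min a (pvGtF cs r.toNat)
       (if m = 0 then res else max res (r - l - 1 + 2 * (m : Int)), r + m)) := by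
  induction fuel with
  | zero => intro l r res _ _ _ hfuel; omega
  | succ fuel ih =>
    intro l r res hres hr hl hfuel
    simp only [pvInnerA]
    by_cases hg : 0 ≤ l ∧ r < (cs.length : Int) ∧
        PySem.List.pyGet? cs l = some '<' ∧ PySem.List.pyGet? cs r = some '>'
    · obtain ⟨hl0, hrn, hlc, hrc⟩ := hg
      rw [if_pos ⟨hl0, hrn, hlc, hrc⟩]
      have hln : l.toNat < cs.length := by omega
      have hrn' : r.toNat < cs.length := by omega
      have hgl : cs.getD l.toNat ' ' = '<' := by
        have := pvGet_eq cs l hl0 hl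
        rw [this] at hlc; exact Option.some.inj hlc
      have hgr : cs.getD r.toNat ' ' = '>' := by
        have := pvGet_eq cs r hr hrn
        rw [this] at hrc; exact Option.some.inj hrc
      have ha : pvLtE cs (l.toNat + 1) = pvLtE cs l.toNat + 1 := by
        rw [pvLtE_succ cs l.toNat hln, if_pos hgl]
      have hb : pvGtF cs r.toNat = pvGtF cs (r.toNat + 1) + 1 := by
        rw [pvGtF_succ cs r.toNat hrn', if_pos hgr]
      have hrt : (r + 1).toNat = r.toNat + 1 := by omega
      have := ih (l - 1) (r + 1) (max res (r - l + 1))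
        (le_trans hres (le_max_left _ _)) (by omega) (by omega) (by rw [hrt]; omega)
      rw [this]
      have haux : (if l - 1 < 0 then 0 else pvLtE cs ((l - 1).toNat + 1)) = pvLtE cs l.toNat := by
        by_cases h0 : l = 0
        · subst h0; simp [pvLtE_zero]
        · rw [if_neg (by omega)]
          congr 1
          omega
      rw [haux, hrt, hb]
      rw [if_neg (by omega : ¬ l < 0), ha]
      simp only
      refine Prod.ext ?_ ?_
      · simp only [max_def]
        split_ifs <;> push_cast <;> omega
      · simp only
        push_cast
        omega
    · rw [if_neg hg]
      have hm : min (if l < 0 then 0 else pvLtE cs (l.toNat + 1)) (pvGtF cs r.toNat) = 0 := by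
        by_cases hl0 : 0 ≤ l
        · by_cases hrn : r < (cs.length : Int)
          · have hln : l.toNat < cs.length := by omega
            have hrn' : r.toNat < cs.length := by omega
            by_cases hlc : PySem.List.pyGet? cs l = some '<'
            · have hrc : ¬ PySem.List.pyGet? cs r = some '>' := by
                intro h; exact hg ⟨hl0, hrn, hlc, h⟩
              have hgr : ¬ cs.getD r.toNat ' ' = '>' := by
                intro h; apply hrc; rw [pvGet_eq cs r (by omega) hrn, h]
              have : pvGtF cs r.toNat = 0 := by
                rw [pvGtF_succ cs r.toNat hrn', if_neg hgr]
              omega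
            · have hgl : ¬ cs.getD l.toNat ' ' = '<' := by
                intro h; apply hlc; rw [pvGet_eq cs l (by omega) hl, h]
              have : pvLtE cs (l.toNat + 1) = 0 := by
                rw [pvLtE_succ cs l.toNat hln, if_neg hgl]
              rw [if_neg (by omega : ¬ l < 0), this]
              omega
          · have : pvGtF cs r.toNat = 0 := pvGtF_ge_len cs r.toNat (by omega)
            omega
        · rw [if_pos (by omega : l < 0)]
          omega
      simp only [hm]
      norm_num

lemma pvCand_zero_of_gt (cs : List Char) (j : Nat) (hj : j < cs.length)
    (h : cs.getD j ' ' = '>') : pvCand cs j = 0 := by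
  have : pvLtE cs (j+1) = 0 := by
    rw [pvLtE_succ cs j hj, if_neg (by rw [h]; decide)]
  simp [pvCand, this]

lemma pvF_plateau (cs : List Char) (t : Nat) :
    ∀ q, (∀ p < q, pvCand cs (t + p) = 0) → pvF cs (t + q) = pvF cs t := by
  intro q
  induction q with
  | zero => intro _; rfl
  | succ q ih =>
    intro h
    have : t + (q + 1) = (t + q) + 1 := by omega
    rw [this]
    show max (pvF cs (t + q)) (pvCand cs (t + q)) = pvF cs t
    rw [ih (fun p hp => h p (by omega)), h q (by omega)]
    omega

lemma pvOuterA_step (cs : List Char) (fuel : Nat) (i : Nat) (hin : i < cs.length)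
    (hex : ¬ ((pvF cs i : Int) ≥ (cs.length : Int) - (i : Int))) :
    pvOuterA cs (fuel+1) (pvF cs i) i =
      pvOuterA cs fuel (pvF cs (i + 1 + min (pvLtE cs (i+1)) (pvGtF cs (i+1))))
        ((i + 1 + min (pvLtE cs (i+1)) (pvGtF cs (i+1)) : Nat))  ∧
    i + 1 + min (pvLtE cs (i+1)) (pvGtF cs (i+1)) ≤ cs.length ∧
    pvF cs (i + 1 + min (pvLtE cs (i+1)) (pvGtF cs (i+1))) = max (pvF cs i) (pvCand cs i) := by
  have hspec := pvInnerA_spec cs (cs.length + 1) (i : Int) ((i : Int) + 1) (pvF cs i)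
    (by positivity) (by omega) (by exact_mod_cast by omega : (i : Int) < (cs.length : Int))
    (by
      have h1 : ((i : Int) + 1).toNat = i + 1 := by omega
      rw [h1]
      have := pvGtF_le cs (i + 1)
      omega)
  have h1 : ((i : Int) + 1).toNat = i + 1 := by omega
  rw [h1] at hspec
  rw [if_neg (by omega : ¬ (i : Int) < 0)] at hspec
  have h2 : (i : Int).toNat = i := by omega
  rw [h2] at hspec
  set m : Nat := min (pvLtE cs (i + 1)) (pvGtF cs (i + 1)) with hm
  have hcand : pvCand cs i = 2 * m := rfl
  have hmgt : m ≤ pvGtF cs (i + 1) := by omega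
  have hgtle : pvGtF cs (i + 1) ≤ cs.length - (i + 1) := pvGtF_le cs (i + 1)
  have hi' : i + 1 + m ≤ cs.length := by omega
  -- chars i+1 .. i+m are '>', so the skipped centres contribute 0
  have hchars : ∀ p < m, cs.getD (i + 1 + p) ' ' = '>' :=
    ((pvGtF_ge_iff cs (i + 1) m (by omega)).mp hmgt).2
  have hplat : pvF cs (i + 1 + m) = pvF cs (i + 1) := by
    apply pvF_plateau
    intro p hp
    exact pvCand_zero_of_gt cs (i + 1 + p) (by omega) (hchars p hp)
  have hF : pvF cs (i + 1 + m) = max (pvF cs i) (2 * m) := by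
    rw [hplat]
    show max (pvF cs i) (pvCand cs i) = _
    rw [hcand]
  refine ⟨?_, hi', by rw [hF, hcand]⟩
  show pvOuterA cs (fuel+1) (pvF cs i) i = _
  simp only [pvOuterA]
  rw [if_pos (by exact_mod_cast by omega : (i : Int) < (cs.length : Int)), if_neg hex]
  rw [hspec]
  simp only
  have hval : (if m = 0 then (pvF cs i : Int)
      else max (pvF cs i : Int) ((i : Int) + 1 - (i : Int) - 1 + 2 * (m : Int)))
      = (pvF cs (i + 1 + m) : Int) := by
    rw [hF]
    by_cases hm0 : m = 0
    · simp [hm0]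
    · rw [if_neg hm0]
      push_cast
      simp only [max_def]
      split_ifs <;> omega
  have hpos : ((i : Int) + 1 + (m : Int)) = ((i + 1 + m : Nat) : Int) := by push_cast; ring
  rw [hval, hpos]

lemma pvOuterA_spec (cs : List Char)
    (HD : ∀ j < cs.length, cs.length ≤ j + pvF cs j → pvF cs j = pvF cs cs.length) :
    ∀ (fuel : Nat) (i : Nat), i ≤ cs.length → cs.length - i < fuel →
      pvOuterA cs fuel (pvF cs i) i = (pvF cs cs.length : Int) := by
  intro fuel
  induction fuel with
  | zero => intro i _ hfuel; omega
  | succ fuel ih =>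
    intro i hi hfuel
    by_cases hin : i < cs.length
    · by_cases hex : (pvF cs i : Int) ≥ (cs.length : Int) - (i : Int)
      · simp only [pvOuterA]
        rw [if_pos (by exact_mod_cast by omega : (i : Int) < (cs.length : Int)), if_pos hex]
        rw [HD i (by omega) (by omega)]
      · obtain ⟨hstep, hle, _⟩ := pvOuterA_step cs fuel i hin hex
        rw [hstep]
        exact ih _ hle (by omega)
    · simp only [pvOuterA]
      rw [if_neg (by exact_mod_cast by omega : ¬ (i : Int) < (cs.length : Int))]
      have : i = cs.length := by omega
      rw [this]

-- inside D_, A's scan exits early with a value strictly below the true best pvF n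
lemma pvOuterA_lt (cs : List Char) (w : Nat) (hw : w < cs.length)
    (hge : cs.length ≤ w + pvF cs w) (hlt : pvF cs w < pvF cs cs.length) :
    ∀ (fuel : Nat) (i : Nat), i ≤ w → cs.length - i < fuel →
      pvOuterA cs fuel (pvF cs i) i < (pvF cs cs.length : Int) := by
  intro fuel
  induction fuel with
  | zero => intro i _ hfuel; omega
  | succ fuel ih =>
    intro i hiw hfuel
    have hin : i < cs.length := by omega
    by_cases hex : (pvF cs i : Int) ≥ (cs.length : Int) - (i : Int)
    · simp only [pvOuterA]
      rw [if_pos (by exact_mod_cast by omega : (i : Int) < (cs.length : Int)), if_pos hex]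
      have := pvF_mono cs hiw
      exact_mod_cast by omega
    · obtain ⟨hstep, hle, hval⟩ := pvOuterA_step cs fuel i hin hex
      rw [hstep]
      set i' : Nat := i + 1 + min (pvLtE cs (i+1)) (pvGtF cs (i+1)) with hi'
      by_cases hcase : i' ≤ w
      · exact ih i' hcase (by omega)
      · -- the step jumps past the witness; its value equals pvF (i+1) ≤ pvF w < pvF n,
        -- and at i' the exit condition holds at once
        have hiw' : i < w := by
          rcases Nat.eq_or_lt_of_le hiw with h | h
          · exfalso; apply hex; subst h; omega
          · omega
        have hFi' : pvF cs i' = max (pvF cs i) (pvCand cs i) := hval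
        have hFi1 : pvF cs i' ≤ pvF cs w := by
          have h1 : max (pvF cs i) (pvCand cs i) = pvF cs (i + 1) := rfl
          rw [hFi', h1]
          exact pvF_mono cs (by omega)
        cases fuel with
        | zero => omega
        | succ fuel' =>
          by_cases hin' : i' < cs.length
          · simp only [pvOuterA]
            rw [if_pos (by exact_mod_cast by omega : (i' : Int) < (cs.length : Int))]
            rw [if_pos ?_]
            · exact_mod_cast by omega
            · -- pvF i' ≥ pvF w ≥ n - w ≥ n - i'
              have h2 : pvF cs w ≤ pvF cs i' := pvF_mono cs (by omega)
              exact_mod_cast by omega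
          · simp only [pvOuterA]
            rw [if_neg (by exact_mod_cast by omega : ¬ (i' : Int) < (cs.length : Int))]
            exact_mod_cast by omega

-- ---- B side ----

def pvGtE (cs : List Char) (i : Nat) : Nat := pvLead '>' ((cs.take i).reverse)
def pvLtS (cs : List Char) (i : Nat) : Nat := pvLtE cs (i - pvGtE cs i)

def pvG (cs : List Char) : Nat → Nat
  | 0 => 0
  | i+1 => if cs.getD i ' ' = '>' then max (pvG cs i) (2 * min (pvLtS cs i) (pvGtE cs i + 1))
           else pvG cs i

lemma pvGtE_succ (cs : List Char) (j : Nat) (hj : j < cs.length) :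
    pvGtE cs (j+1) = if cs.getD j ' ' = '>' then pvGtE cs j + 1 else 0 :=
  pvRevRun_succ '>' cs j hj

lemma pvGtE_le (cs : List Char) (i : Nat) (hi : i ≤ cs.length) : pvGtE cs i ≤ i := by
  have := pvLead_le_length '>' ((cs.take i).reverse)
  have hlen : ((cs.take i).reverse).length = i := by simp [List.length_take]; omega
  simp only [pvGtE]
  omega

lemma pvFoldB_state (cs : List Char) :
    ∀ i, i ≤ cs.length →
    (cs.take i).foldl pvStepB (0, 0, 0) =
      ((pvG cs i : Int), (pvLtS cs i : Int), (pvGtE cs i : Int)) := by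
  intro i
  induction i with
  | zero => intro _; simp [pvG, pvLtS, pvGtE, pvLtE, pvLead]
  | succ i ih =>
    intro hi
    have hin : i < cs.length := by omega
    have hgd : cs.getD i ' ' = cs[i] := by
      rw [List.getD_eq_getElem?_getD, List.getElem?_eq_getElem hin]; rfl
    rw [List.take_succ_eq_append_getElem hin, List.foldl_append, ih (by omega)]
    simp only [List.foldl_cons, List.foldl_nil]
    by_cases hlt : cs[i] = '<'
    · have hgd' : cs.getD i ' ' = '<' := by rw [hgd, hlt]
      have hgte : pvGtE cs (i+1) = 0 := by
        rw [pvGtE_succ cs i hin, if_neg (by rw [hgd']; decide)]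
      have hlts : pvLtS cs (i+1) = pvLtE cs i + 1 := by
        rw [pvLtS, hgte, Nat.sub_zero, pvLtE_succ cs i hin, if_pos hgd']
      have hG : pvG cs (i+1) = pvG cs i := by
        show (if cs.getD i ' ' = '>' then _ else _) = _
        rw [if_neg (by rw [hgd']; decide)]
      rw [pvStepB, if_pos hlt]
      refine Prod.ext (by rw [hG]) (Prod.ext ?_ (by simp [hgte]))
      simp only
      by_cases hg0 : pvGtE cs i = 0
      · rw [if_neg (by simp [hg0])]
        have : pvLtS cs i = pvLtE cs i := by rw [pvLtS, hg0, Nat.sub_zero]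
        rw [hlts, this]
        push_cast; ring
      · rw [if_pos (by simp; omega)]
        -- the '<'-run ending before i is empty: cs[i-1] = '>'
        have hi1 : 1 ≤ i := by
          by_contra h
          have : i = 0 := by omega
          subst this
          exact hg0 (by simp [pvGtE, pvLead])
        have hprev : cs.getD (i-1) ' ' = '>' := by
          have := pvGtE_succ cs (i-1) (by omega)
          have hh : i - 1 + 1 = i := by omega
          rw [hh] at this
          by_contra hcon
          rw [if_neg hcon] at this
          omega
        have hlte0 : pvLtE cs i = 0 := by
          have := pvLtE_succ cs (i-1) (by omega)
          have hh : i - 1 + 1 = i := by omega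
          rw [hh] at this
          rw [this, if_neg (by rw [hprev]; decide)]
        rw [hlts, hlte0]
        norm_num
    · by_cases hgt : cs[i] = '>'
      · have hgd' : cs.getD i ' ' = '>' := by rw [hgd, hgt]
        have hgte : pvGtE cs (i+1) = pvGtE cs i + 1 := by
          rw [pvGtE_succ cs i hin, if_pos hgd']
        have hlts : pvLtS cs (i+1) = pvLtS cs i := by
          rw [pvLtS, pvLtS, hgte]
          congr 1
          omega
        have hG : pvG cs (i+1) =
            max (pvG cs i) (2 * min (pvLtS cs i) (pvGtE cs i + 1)) := by
          show (if cs.getD i ' ' = '>' then _ else _) = _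
          rw [if_pos hgd']
        rw [pvStepB, if_neg (by rw [hgt]; decide), if_pos hgt]
        refine Prod.ext ?_ (Prod.ext (by rw [hlts]) (by rw [hgte]; push_cast; ring))
        simp only [hG]
        push_cast
        simp only [max_def, min_def]
        split_ifs <;> omega
      · have hgd' : ¬ cs.getD i ' ' = '>' := by rw [hgd]; exact hgt
        have hgd'' : ¬ cs.getD i ' ' = '<' := by rw [hgd]; exact hlt
        have hgte : pvGtE cs (i+1) = 0 := by
          rw [pvGtE_succ cs i hin, if_neg hgd']
        have hlts : pvLtS cs (i+1) = 0 := by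
          rw [pvLtS, hgte, Nat.sub_zero, pvLtE_succ cs i hin, if_neg hgd'']
        have hG : pvG cs (i+1) = pvG cs i := by
          show (if cs.getD i ' ' = '>' then _ else _) = _
          rw [if_neg hgd']
        rw [pvStepB, if_neg hlt, if_neg hgt]
        exact Prod.ext (by rw [hG]) (Prod.ext (by simp [hlts]) (by simp [hgte]))

-- truncated candidate: the '>'-run counted only up to position i
def pvCandT (cs : List Char) (i c : Nat) : Nat :=
  2 * min (pvLtE cs (c+1)) (min (pvGtF cs (c+1)) (i - (c+1)))

def pvFT (cs : List Char) (i : Nat) : Nat → Nat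
  | 0 => 0
  | c+1 => max (pvFT cs i c) (pvCandT cs i c)

lemma pvFT_congr (cs : List Char) (i i' : Nat) :
    ∀ m, (∀ c < m, pvCandT cs i c = pvCandT cs i' c) → pvFT cs i m = pvFT cs i' m := by
  intro m
  induction m with
  | zero => intro _; rfl
  | succ m ih =>
    intro h
    show max (pvFT cs i m) (pvCandT cs i m) = max (pvFT cs i' m) (pvCandT cs i' m)
    rw [ih (fun c hc => h c (by omega)), h m (by omega)]

lemma pvFT_eq_F (cs : List Char) : ∀ m, pvFT cs cs.length m = pvF cs m := by
  intro m
  induction m with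
  | zero => rfl
  | succ m ih =>
    show max (pvFT cs cs.length m) (pvCandT cs cs.length m) = max (pvF cs m) (pvCand cs m)
    rw [ih]
    congr 1
    have := pvGtF_le cs (m+1)
    simp only [pvCandT, pvCand]
    congr 1
    omega

lemma pvFT_update (cs : List Char) (i i' c' : Nat)
    (hothers : ∀ c, c ≠ c' → pvCandT cs i' c = pvCandT cs i c)
    (hle : pvCandT cs i c' ≤ pvCandT cs i' c') :
    ∀ m, c' < m → pvFT cs i' m = max (pvFT cs i m) (pvCandT cs i' c') := by
  intro m
  induction m with
  | zero => omega
  | succ m ih =>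
    intro hm
    by_cases hc : c' = m
    · subst hc
      show max (pvFT cs i' c') (pvCandT cs i' c') = max (max (pvFT cs i c') (pvCandT cs i c')) _
      rw [pvFT_congr cs i' i c' (fun c hcm => hothers c (by omega))]
      omega
    · have hm' : c' < m := by omega
      show max (pvFT cs i' m) (pvCandT cs i' m) = max (max (pvFT cs i m) (pvCandT cs i m)) _
      rw [ih hm', hothers m (by omega)]
      omega

lemma pvG_eq_FT (cs : List Char) : ∀ i, i ≤ cs.length → pvG cs i = pvFT cs i i := by
  intro i
  induction i with
  | zero => intro _; rfl
  | succ i ih =>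
    intro hi
    have hin : i < cs.length := by omega
    -- the new centre i is always worth 0 in pvFT (i+1)
    have hlast : pvCandT cs (i+1) i = 0 := by
      simp [pvCandT]
    by_cases hgt : cs.getD i ' ' = '>'
    · have hG : pvG cs (i+1) = max (pvG cs i) (2 * min (pvLtS cs i) (pvGtE cs i + 1)) := by
        show (if cs.getD i ' ' = '>' then _ else _) = _
        rw [if_pos hgt]
      set g : Nat := pvGtE cs i with hg
      have hgle : g ≤ i := pvGtE_le cs i (by omega)
      -- the g positions before i are '>'
      have hrun : ∀ p < g, cs.getD (i - 1 - p) ' ' = '>' :=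
        ((pvRevRun_ge_iff '>' cs i g (by omega)).mp (le_refl _)).2
      have hrun' : ∀ j, i - g ≤ j → j < i → cs.getD j ' ' = '>' := by
        intro j h1 h2
        have := hrun (i - 1 - j) (by omega)
        have hh : i - 1 - (i - 1 - j) = j := by omega
        rwa [hh] at this
      by_cases hgi : g = i
      · -- the whole prefix is '>': everything in sight is 0
        have hall : ∀ j < i, cs.getD j ' ' = '>' := fun j hj => hrun' j (by omega) hj
        have hlts0 : pvLtS cs i = 0 := by
          rw [pvLtS, ← hg, hgi, Nat.sub_self, pvLtE_zero]
        have hzero : ∀ c < i + 1, pvCandT cs (i+1) c = 0 := by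
          intro c hc
          have hlte0 : pvLtE cs (c+1) = 0 := by
            rw [pvLtE_succ cs c (by omega), if_neg ?_]
            by_cases hci : c = i
            · subst hci; rw [hgt]; decide
            · rw [hall c (by omega)]; decide
          simp [pvCandT, hlte0]
        have hzeroFT : pvFT cs (i+1) (i+1) = pvFT cs i i := by
          rw [pvFT_congr cs (i+1) i (i+1) ?_]
          · show max (pvFT cs i i) (pvCandT cs i i) = pvFT cs i i
            have : pvCandT cs i i = 0 := by simp [pvCandT]
            rw [this]; omega
          · intro c hc
            rw [hzero c hc]
            by_cases hci : c = i
            · subst hci; simp [pvCandT]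
            · have hlte0 : pvLtE cs (c+1) = 0 := by
                rw [pvLtE_succ cs c (by omega), if_neg (by rw [hall c (by omega)]; decide)]
              simp [pvCandT, hlte0]
        rw [hG, hzeroFT, ← ih (by omega), hlts0]
        simp
      · -- proper run: the centre c' = i - g - 1 gets its candidate extended by this '>'
        have hgi' : g < i := by omega
        set c' : Nat := i - g - 1 with hc'
        have hstop : ¬ cs.getD c' ' ' = '>' := by
          intro hcon
          have : g + 1 ≤ pvLead '>' ((cs.take i).reverse) := by
            apply (pvRevRun_ge_iff '>' cs i (g+1) (by omega)).mpr
            refine ⟨by omega, ?_⟩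
            intro p hp
            by_cases hpg : p < g
            · exact hrun p hpg
            · have : p = g := by omega
              subst this
              have hh : i - 1 - g = c' := by omega
              rwa [hh]
          have hgdef : pvGtE cs i = pvLead '>' ((cs.take i).reverse) := rfl
          omega
        have hgtfc : g + 1 ≤ pvGtF cs (c'+1) := by
          apply (pvGtF_ge_iff cs (c'+1) (g+1) (by omega)).mpr
          refine ⟨by omega, ?_⟩
          intro p hp
          by_cases hpg : p < g
          · exact hrun' (c' + 1 + p) (by omega) (by omega)
          · have : p = g := by omega
            subst this
            have hh : c' + 1 + g = i := by omega
            rwa [hh]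
        have hlts : pvLtS cs i = pvLtE cs (c'+1) := by
          rw [pvLtS, ← hg]
          congr 1
          omega
        have hcT' : pvCandT cs (i+1) c' = 2 * min (pvLtE cs (c'+1)) (g+1) := by
          simp only [pvCandT]
          congr 1
          have hh : (i+1) - (c'+1) = g + 1 := by omega
          rw [hh]
          omega
        have hcT : pvCandT cs i c' = 2 * min (pvLtE cs (c'+1)) g := by
          simp only [pvCandT]
          congr 1
          have hh : i - (c'+1) = g := by omega
          rw [hh]
          omega
        have hothers : ∀ c, c ≠ c' → pvCandT cs (i+1) c = pvCandT cs i c := by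
          intro c hc
          by_cases hci : c < i
          · by_cases htrunc : pvGtF cs (c+1) ≤ i - (c+1)
            · simp only [pvCandT]
              congr 1
              omega
            · -- the '>'-run from c+1 reaches i, so c+1 > c'+1, i.e. cs[c] = '>' and pvLtE = 0
              have hge : i - c ≤ pvGtF cs (c+1) := by omega
              have hch := (pvGtF_ge_iff cs (c+1) (i - c) (by omega)).mp
                (by omega)
              have hcc' : c' < c := by
                by_contra hcon
                have hcc : c < c' := by omega
                have := hch.2 (c' - c - 1) (by omega)
                have hh : c + 1 + (c' - c - 1) = c' := by omega
                rw [hh] at this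
                exact hstop this
              have hcgt : cs.getD c ' ' = '>' := hrun' c (by omega) hci
              have hlte0 : pvLtE cs (c+1) = 0 := by
                rw [pvLtE_succ cs c (by omega), if_neg (by rw [hcgt]; decide)]
              simp [pvCandT, hlte0]
          · by_cases hcieq : c = i
            · subst hcieq
              rw [hlast]
              simp [pvCandT]
            · simp only [pvCandT]
              congr 1
              have h1 : pvGtF cs (c+1) ≤ cs.length - (c+1) := pvGtF_le cs (c+1)
              omega
        have hup := pvFT_update cs i (i+1) c' hothers (by rw [hcT', hcT]; omega) (i+1) (by omega)
        have hfinal : pvFT cs (i+1) (i+1) = max (pvFT cs i i) (pvCandT cs (i+1) c') := by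
          rw [hup]
          have hzero : pvCandT cs i i = 0 := by simp [pvCandT]
          show max (max (pvFT cs i i) (pvCandT cs i i)) _ = _
          rw [hzero]
          omega
        rw [hG, ih (by omega), hlts, hfinal, hcT']
    · have hG : pvG cs (i+1) = pvG cs i := by
        show (if cs.getD i ' ' = '>' then _ else _) = _
        rw [if_neg hgt]
      have hothers : ∀ c, c < i + 1 → pvCandT cs (i+1) c = pvCandT cs i c := by
        intro c hc
        by_cases hci : c = i
        · subst hci
          rw [hlast]
          simp [pvCandT]
        · by_cases htrunc : pvGtF cs (c+1) ≤ i - (c+1)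
          · simp only [pvCandT]
            congr 1
            omega
          · exfalso
            have hge : i - c ≤ pvGtF cs (c+1) := by omega
            have hch := (pvGtF_ge_iff cs (c+1) (i - c) (by omega)).mp (by omega)
            have := hch.2 (i - c - 1) (by omega)
            have hh : c + 1 + (i - c - 1) = i := by omega
            rw [hh] at this
            exact hgt this
      have : pvFT cs (i+1) (i+1) = pvFT cs i i := by
        show max (pvFT cs (i+1) i) (pvCandT cs (i+1) i) = pvFT cs i i
        rw [hlast, pvFT_congr cs (i+1) i i (fun c hc => hothers c (by omega))]
        omega
      rw [hG, this, ih (by omega)]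

lemma pvG_eq_F (cs : List Char) : pvG cs cs.length = pvF cs cs.length := by
  rw [pvG_eq_FT cs cs.length (le_refl _), pvFT_eq_F cs cs.length]


-- ---- fast decision procedure for D_ (linear-time; the slow instance above is the
-- generic bounded search, this one is used on large inputs) ----

-- run lengths of ch at every suffix position: (pvRuns ch l).getD i 0 = pvLead ch (l.drop i)
def pvRuns (ch : Char) (l : List Char) : List Nat :=
  l.foldr (fun c acc => (if c = ch then acc.headD 0 + 1 else 0) :: acc) [0]

def pvStepChk (n T : Nat) (st : (Nat × Nat) × Bool) (cd : Nat) : (Nat × Nat) × Bool :=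
  ((st.1.1 + 1, max st.1.2 cd), st.2 || (decide (n ≤ st.1.1 + st.1.2) && decide (st.1.2 < T)))

def pvChk (s : String) : Bool :=
  let cs := s.toList
  let cands := List.zipWith (fun a b => 2 * min a b)
    ((pvRuns '<' cs.reverse).reverse).tail (pvRuns '>' cs).tail
  ((cands.foldl (pvStepChk cs.length (cands.foldl max 0)) ((0, 0), false)).2)

lemma pvHeadD_getD (l : List Nat) : l.headD 0 = l.getD 0 0 := by cases l <;> rfl

lemma pvRuns_getD (ch : Char) : ∀ (l : List Char) (j : Nat),
    (pvRuns ch l).getD j 0 = pvLead ch (l.drop j) := by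
  intro l
  induction l with
  | nil =>
    intro j
    cases j <;> simp [pvRuns, pvLead]
  | cons c t ih =>
    intro j
    have hstep : pvRuns ch (c :: t) =
        (if c = ch then (pvRuns ch t).headD 0 + 1 else 0) :: pvRuns ch t := rfl
    cases j with
    | zero =>
      rw [hstep]
      show (if c = ch then (pvRuns ch t).headD 0 + 1 else 0) = pvLead ch (c :: t)
      rw [pvHeadD_getD, ih 0]
      simp [pvLead]
    | succ j =>
      rw [hstep]
      show (pvRuns ch t).getD j 0 = pvLead ch ((c :: t).drop (j + 1))
      rw [ih j]
      rfl

lemma pvRuns_length (ch : Char) (l : List Char) : (pvRuns ch l).length = l.length + 1 := by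
  induction l with
  | nil => rfl
  | cons c t ih =>
    show ((if c = ch then (pvRuns ch t).headD 0 + 1 else 0) :: pvRuns ch t).length = _
    simp [ih]

lemma pvGts_getD (cs : List Char) (j : Nat) : (pvRuns '>' cs).getD j 0 = pvGtF cs j :=
  pvRuns_getD '>' cs j

lemma pvLts_getD (cs : List Char) (i : Nat) (hi : i ≤ cs.length) :
    ((pvRuns '<' cs.reverse).reverse).getD i 0 = pvLtE cs i := by
  have hlen : (pvRuns '<' cs.reverse).length = cs.length + 1 := by
    rw [pvRuns_length]; simp
  rw [List.getD_eq_getElem?_getD, List.getElem?_reverse (by omega), hlen]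
  have hh : cs.length + 1 - 1 - i = cs.length - i := by omega
  rw [hh, ← List.getD_eq_getElem?_getD, pvRuns_getD '<' cs.reverse (cs.length - i)]
  have hdrop : cs.reverse.drop (cs.length - i) = (cs.take i).reverse := by
    rw [List.reverse_take]
  rw [hdrop]
  rfl

lemma pvCands_eq (cs : List Char) :
    List.zipWith (fun a b => 2 * min a b)
      ((pvRuns '<' cs.reverse).reverse).tail (pvRuns '>' cs).tail =
    (List.range' 0 cs.length).map (pvCand cs) := by
  have hr1 : ((pvRuns '<' cs.reverse).reverse).length = cs.length + 1 := by
    rw [List.length_reverse, pvRuns_length, List.length_reverse]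
  have hl1 : (((pvRuns '<' cs.reverse).reverse).tail).length = cs.length := by
    rw [List.length_tail, hr1]; omega
  have hl2 : ((pvRuns '>' cs).tail).length = cs.length := by
    rw [List.length_tail, pvRuns_length]; omega
  apply List.ext_getElem
  · rw [List.length_zipWith, hl1, hl2, List.length_map, List.length_range']
    omega
  · intro c h1 h2
    have hc : c < cs.length := by
      rw [List.length_map, List.length_range'] at h2
      exact h2
    rw [List.getElem_zipWith, List.getElem_map, List.getElem_range']
    have e1 : (((pvRuns '<' cs.reverse).reverse).tail)[c]'(by omega) = pvLtE cs (c + 1) := by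
      rw [List.getElem_tail, ← List.getD_eq_getElem _ 0 (by omega)]
      exact pvLts_getD cs (c + 1) (by omega)
    have e2 : ((pvRuns '>' cs).tail)[c]'(by omega) = pvGtF cs (c + 1) := by
      rw [List.getElem_tail, ← List.getD_eq_getElem _ 0 (by rw [pvRuns_length]; omega)]
      exact pvGts_getD cs (c + 1)
    rw [e1, e2]
    show 2 * min (pvLtE cs (c + 1)) (pvGtF cs (c + 1)) = pvCand cs (0 + 1 * c)
    have : 0 + 1 * c = c := by omega
    rw [this]
    rfl

lemma pvF_eq_foldl (cs : List Char) : ∀ m,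
    ((List.range' 0 m).map (pvCand cs)).foldl max 0 = pvF cs m := by
  intro m
  induction m with
  | zero => rfl
  | succ m ih =>
    rw [List.range'_concat, List.map_append, List.foldl_append]
    simp only [List.map_cons, List.map_nil, List.foldl_cons, List.foldl_nil]
    rw [ih]
    have h1 : 0 + 1 * m = m := by omega
    rw [h1]
    rfl

lemma pvScan_spec (cs : List Char) (T : Nat) : ∀ (l : List Nat) (i Fi : Nat) (fd : Bool),
    l = (List.range' i (cs.length - i)).map (pvCand cs) → Fi = pvF cs i → i ≤ cs.length →
    ((l.foldl (pvStepChk cs.length T) ((i, Fi), fd)).2 = true ↔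
      (fd = true ∨ ∃ j, i ≤ j ∧ j < cs.length ∧ cs.length ≤ j + pvF cs j ∧ pvF cs j < T)) := by
  intro l
  induction l with
  | nil =>
    intro i Fi fd heq _ hi
    have hni : cs.length = i := by
      have := congrArg List.length heq
      simp at this
      omega
    simp only [List.foldl_nil]
    constructor
    · intro h; exact Or.inl h
    · rintro (h | ⟨j, h1, h2, _, _⟩)
      · exact h
      · omega
  | cons cd rest ih =>
    intro i Fi fd heq hF hi
    have hin : i < cs.length := by
      by_contra hcon
      have : cs.length - i = 0 := by omega
      rw [this] at heq
      simp at heq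
    have hsplit : List.range' i (cs.length - i) = i :: List.range' (i+1) (cs.length - (i+1)) := by
      have h1 : cs.length - i = (cs.length - (i+1)) + 1 := by omega
      rw [h1, List.range'_succ]
    rw [hsplit] at heq
    simp only [List.map_cons, List.cons.injEq] at heq
    obtain ⟨hcd, hrest⟩ := heq
    simp only [List.foldl_cons]
    have hstep : pvStepChk cs.length T ((i, Fi), fd) cd =
        ((i + 1, max Fi cd), fd || (decide (cs.length ≤ i + Fi) && decide (Fi < T))) := rfl
    rw [hstep]
    rw [ih (i+1) (max Fi cd)
      (fd || (decide (cs.length ≤ i + Fi) && decide (Fi < T))) hrest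
      (by rw [hF, hcd]; rfl) (by omega)]
    constructor
    · rintro (h | ⟨j, h1, h2, h3, h4⟩)
      · rcases Bool.or_eq_true_iff.mp h with h' | h'
        · exact Or.inl h'
        · simp only [Bool.and_eq_true, decide_eq_true_eq] at h'
          exact Or.inr ⟨i, by omega, by omega, by omega, by omega⟩
      · exact Or.inr ⟨j, by omega, h2, h3, h4⟩
    · rintro (h | ⟨j, h1, h2, h3, h4⟩)
      · exact Or.inl (by rw [h]; rfl)
      · rcases Nat.eq_or_lt_of_le h1 with hj | hj
        · subst hj
          refine Or.inl ?_
          have : (decide (cs.length ≤ i + Fi) && decide (Fi < T)) = true := by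
            simp only [Bool.and_eq_true, decide_eq_true_eq]
            omega
          rw [this, Bool.or_true]
        · exact Or.inr ⟨j, by omega, h2, h3, h4⟩

lemma pvChk_iff_F (s : String) :
    pvChk s = true ↔
      ∃ i, i < s.toList.length ∧ s.toList.length ≤ i + pvF s.toList i ∧
        pvF s.toList i < pvF s.toList s.toList.length := by
  unfold pvChk
  simp only [pvCands_eq s.toList]
  rw [pvF_eq_foldl s.toList s.toList.length]
  have hcands : (List.range' 0 s.toList.length).map (pvCand s.toList) =
      (List.range' 0 (s.toList.length - 0)).map (pvCand s.toList) := by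
    congr 1
  rw [hcands, pvScan_spec s.toList (pvF s.toList s.toList.length) _ 0 0 false rfl rfl (by omega)]
  constructor
  · rintro (h | ⟨j, _, h2, h3, h4⟩)
    · cases h
    · exact ⟨j, h2, h3, h4⟩
  · rintro ⟨i, h1, h2, h3⟩
    exact Or.inr ⟨i, by omega, h1, h2, h3⟩

instance pvDecDFast (s : String) : Decidable (D_count_longest_sym_substr s) :=
  decidable_of_iff (pvChk s = true) ((pvChk_iff_F s).trans (pvD_iff_F s).symm)

-- ===== VERDICT (by name: the statement is the Claim_ definition above) =====
theorem count_longest_sym_substr_spec : Claim_unchanged_count_longest_sym_substr := by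
  intro s _ hD
  show count_longest_sym_substr s = count_longest_sym_substr_alt s
  unfold count_longest_sym_substr count_longest_sym_substr_alt
  set cs := s.toList with hcs
  have hA : pvOuterA cs (cs.length + 1) 0 0 = (pvF cs cs.length : Int) := by
    have h0 : ((pvF cs 0 : Nat) : Int) = 0 := rfl
    have := pvOuterA_spec cs (pv_not_D_F s hD) (cs.length + 1) 0 (by omega) (by omega)
    rw [h0] at this
    exact this
  have hB : (cs.foldl pvStepB (0, 0, 0)).1 = (pvF cs cs.length : Int) := by
    have := pvFoldB_state cs cs.length (le_refl _)
    rw [List.take_length] at this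
    rw [this, pvG_eq_F]
  rw [hA, hB]

theorem count_longest_sym_substr_changed : Claim_changed_count_longest_sym_substr := by
  unfold Claim_changed_count_longest_sym_substr; decide

theorem count_longest_sym_substr_tight : Claim_exact_count_longest_sym_substr := by
  intro s _ hD
  obtain ⟨w, hw, hge, hlt⟩ := (pvD_iff_F s).mp hD
  show count_longest_sym_substr s ≠ count_longest_sym_substr_alt s
  unfold count_longest_sym_substr count_longest_sym_substr_alt
  have hA : pvOuterA s.toList (s.toList.length + 1) 0 0 < (pvF s.toList s.toList.length : Int) := by
    have h0 : ((pvF s.toList 0 : Nat) : Int) = 0 := rfl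
    have := pvOuterA_lt s.toList w hw hge hlt (s.toList.length + 1) 0 (by omega) (by omega)
    rw [h0] at this
    exact this
  have hB : (s.toList.foldl pvStepB (0, 0, 0)).1 = (pvF s.toList s.toList.length : Int) := by
    have := pvFoldB_state s.toList s.toList.length (le_refl _)
    rw [List.take_length] at this
    rw [this, pvG_eq_F]
  omega
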